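-- pv_equiv track=rewrite | github.com/M-AlShaikh-AlphaOmega/Test_Algorithms_App | Decode_Dataset/RF_Test_Acc-Gyro.py | _temporal_smooth
-- ===== SOURCE A (Python) =====
-- from typing import Dict, List, Tuple, Optional, Any
--
-- def _temporal_smooth(labels: List[str], window_size: int = 5) -> List[str]:
--     """
--     Apply majority-vote temporal smoothing to prevent rapid label flipping.
--     """
--     if window_size <= 1:
--         return labels
--
--     smoothed = labels.copy()
--     half = window_size // 2
--
--     for i in range(len(labels)):
--         start = max(0, i - half)
--         end = min(len(labels), i + half + 1)
--         neighborhood = labels[start:end]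
--         on_count = sum(1 for l in neighborhood if l == 'ON')
--         off_count = sum(1 for l in neighborhood if l == 'OFF')
--         smoothed[i] = 'ON' if on_count > off_count else 'OFF'
--
--     return smoothed
-- ===== SOURCE B (Python) =====
-- from typing import List
--
-- def _temporal_smooth(labels: List[str], window_size: int = 5) -> List[str]:
--     if window_size <= 1:
--         return labels
--     n = len(labels)
--     half = window_size // 2
--     # prefix counts: pon[k] = number of 'ON' among labels[:k], same for 'OFF'
--     pon = [0] * (n + 1)
--     poff = [0] * (n + 1)
--     for i, l in enumerate(labels):
--         pon[i + 1] = pon[i] + (l == 'ON')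
--         poff[i + 1] = poff[i] + (l == 'OFF')
--     return ['ON' if pon[min(n, i + half + 1)] - pon[max(0, i - half)]
--                   > poff[min(n, i + half + 1)] - poff[max(0, i - half)]
--             else 'OFF' for i in range(n)]
-- ===== Notes on version B (the rewrite author's own statement) =====
-- stated objective: faster
-- what changed: Replaces A's per-index window slice with two counting passes by one pass building prefix-sum counts of 'ON' and 'OFF', so each window's vote is two O(1) prefix differences.
import Mathlib
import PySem

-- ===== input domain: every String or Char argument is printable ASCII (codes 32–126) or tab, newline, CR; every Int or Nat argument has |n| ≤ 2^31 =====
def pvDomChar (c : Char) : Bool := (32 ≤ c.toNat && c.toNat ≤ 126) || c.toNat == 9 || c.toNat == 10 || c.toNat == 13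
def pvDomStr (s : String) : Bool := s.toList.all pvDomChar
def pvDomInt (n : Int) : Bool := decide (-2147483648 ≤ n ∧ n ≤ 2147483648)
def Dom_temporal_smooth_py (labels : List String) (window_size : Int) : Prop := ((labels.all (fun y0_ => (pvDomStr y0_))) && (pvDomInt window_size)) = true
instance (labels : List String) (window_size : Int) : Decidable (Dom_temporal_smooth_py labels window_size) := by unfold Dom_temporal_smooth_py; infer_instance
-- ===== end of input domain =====

-- B replaces A's per-index window scan (O(n·w)) by prefix-sum counts of 'ON'/'OFF',
-- reading each window count in O(1): objective 'faster' (asymptotic, O(n·w) → O(n)).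

-- ===== PORT A =====
-- literal port of A: smoothed = labels.copy(); for i in range(n): slice the window,
-- count 'ON' and 'OFF' by a pass over the slice, write smoothed[i].
def temporal_smooth_py (labels : List String) (window_size : Int) : List String :=
  if window_size ≤ 1 then labels
  else
    let half := PySem.Int.floordiv window_size 2
    (List.range labels.length).foldl (fun smoothed (i : Nat) =>
      let start := max 0 ((i : Int) - half)
      let stop := min ((labels.length : Nat) : Int) ((i : Int) + half + 1)
      let neighborhood := PySem.List.slice labels (some start) (some stop)
      let on_count := neighborhood.foldl (fun a l => if l == "ON" then a + 1 else a) (0 : Int)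
      let off_count := neighborhood.foldl (fun a l => if l == "OFF" then a + 1 else a) (0 : Int)
      smoothed.set i (if on_count > off_count then "ON" else "OFF")) labels

-- ===== PORT B =====
-- running prefix counts: pvPrefix t ls c = the list of running counts of t over ls starting from c
-- (the body of B's 'for i, l in enumerate(labels)' loop, one cons per element).
def pvPrefix (t : String) : List String → Int → List Int
  | [], _ => []
  | l :: ls, c =>
    let c' := c + (if l == t then 1 else 0)
    c' :: pvPrefix t ls c'

def temporal_smooth_py_alt (labels : List String) (window_size : Int) : List String :=
  if window_size ≤ 1 then labels
  else
    let n : Int := (labels.length : Nat)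
    let half := PySem.Int.floordiv window_size 2
    let pon := (0 : Int) :: pvPrefix "ON" labels 0
    let poff := (0 : Int) :: pvPrefix "OFF" labels 0
    (List.range labels.length).map (fun (i : Nat) =>
      -- toNat is exact here: both bounds are provably ≥ 0 (max with 0 / min of nonnegatives)
      let s := (max 0 ((i : Int) - half)).toNat
      let e := (min n ((i : Int) + half + 1)).toNat
      if pon.getD e 0 - pon.getD s 0 > poff.getD e 0 - poff.getD s 0 then "ON" else "OFF")

-- ===== PRECONDITION & SPEC =====
def Spec_temporal_smooth_py (labels : List String) (window_size : Int) (out : List String) : Prop := out = temporal_smooth_py_alt labels window_size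
instance (labels : List String) (window_size : Int) (out : List String) : Decidable (Spec_temporal_smooth_py labels window_size out) := by unfold Spec_temporal_smooth_py; infer_instance

-- ===== CLAIM (what is proved, stated in full; the proofs are below) =====
def Claim_equal_temporal_smooth_py : Prop := ∀ (labels : List String) (window_size : Int), Dom_temporal_smooth_py labels window_size → Spec_temporal_smooth_py labels window_size (temporal_smooth_py labels window_size)

-- ===== LEMMAS AND PROOFS =====

-- A's in-place-update loop over range n is the map of the per-index value.
theorem pv_take_set {α : Type} (xs : List α) (s : Nat) (a : α) (h : s < xs.length) :
    (xs.set s a).take (s+1) = xs.take s ++ [a] := by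
  apply List.ext_getElem
  · simp; omega
  · intro i h1 h2
    simp [List.getElem_append, List.getElem_set] at *
    split_ifs <;> simp_all <;> omega

-- A's in-place-update loop over range n is the map of the per-index value.
theorem pv_foldl_set {α : Type} (f : Nat → α) :
    ∀ (m s : Nat) (xs : List α), xs.length = s + m →
      (List.range' s m).foldl (fun sm i => sm.set i (f i)) xs
        = xs.take s ++ (List.range' s m).map f := by
  intro m
  induction m with
  | zero =>
    intro s xs h
    rw [List.range'_zero, List.take_of_length_le (by omega)]
    simp
  | succ m ih =>
    intro s xs h
    rw [List.range'_succ]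
    simp only [List.foldl_cons, List.map_cons]
    rw [ih (s+1) (xs.set s (f s)) (by simp; omega)]
    rw [pv_take_set _ _ _ (by omega)]
    simp

-- characterisation of the prefix-count list
theorem pv_prefix_getD (t : String) : ∀ (ls : List String) (c : Int) (k : Nat),
    k < ls.length →
    (pvPrefix t ls c).getD k 0 = c + ((ls.take (k+1)).countP (· == t) : Int) := by
  intro ls
  induction ls with
  | nil => intro c k h; simp at h
  | cons l ls ih =>
    intro c k h
    cases k with
    | zero => simp [pvPrefix, List.countP_cons]
    | succ k =>
      simp only [pvPrefix, List.getD_cons_succ, List.take_succ_cons, List.countP_cons]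
      rw [ih _ k (by simpa using h)]
      split_ifs <;> push_cast <;> ring

theorem pv_pref_cons (t : String) (labels : List String) (k : Nat) (hk : k ≤ labels.length) :
    ((0 : Int) :: pvPrefix t labels 0).getD k 0 = ((labels.take k).countP (· == t) : Int) := by
  cases k with
  | zero => simp
  | succ k =>
    simp only [List.getD_cons_succ]
    rw [pv_prefix_getD t labels 0 k (by omega)]
    simp

-- per-index agreement of the two window counts
theorem pv_point (labels : List String) (half : Int) (hhalf : 1 ≤ half) (i : Nat)
    (hi : i < labels.length) (t : String) :
    ((PySem.List.slice labels (some (max 0 ((i : Int) - half)))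
        (some (min ((labels.length : Nat) : Int) ((i : Int) + half + 1)))).countP (· == t) : Int)
      = ((0 : Int) :: pvPrefix t labels 0).getD (min ((labels.length : Nat) : Int) ((i : Int) + half + 1)).toNat 0
        - ((0 : Int) :: pvPrefix t labels 0).getD (max 0 ((i : Int) - half)).toNat 0 := by
  set a : Int := max 0 ((i : Int) - half) with ha
  set b : Int := min ((labels.length : Nat) : Int) ((i : Int) + half + 1) with hb
  have ha0 : 0 ≤ a := le_max_left _ _
  have hb0 : 0 ≤ b := by omega
  have hab : a.toNat ≤ b.toNat := by omega
  have hbn : b.toNat ≤ labels.length := by omega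
  rw [PySem.List.slice_toNat labels ha0 hb0]
  rw [pv_pref_cons t labels b.toNat hbn, pv_pref_cons t labels a.toNat (by omega)]
  rw [← List.drop_take]
  have hsplit : labels.take b.toNat
      = (labels.take b.toNat).take a.toNat ++ (labels.take b.toNat).drop a.toNat :=
    (List.take_append_drop _ _).symm
  have h2 : (labels.take b.toNat).take a.toNat = labels.take a.toNat := by
    rw [List.take_take]; congr 1; omega
  have := congrArg (fun l => (List.countP (· == t) l : Int)) hsplit
  simp only [List.countP_append, h2] at this
  push_cast at this ⊢
  omega

-- ===== VERDICT (by name: the statement is the Claim_ definition above) =====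
theorem temporal_smooth_py_spec : Claim_equal_temporal_smooth_py := by
  intro labels w _
  unfold Spec_temporal_smooth_py temporal_smooth_py temporal_smooth_py_alt
  by_cases hw : w ≤ 1
  · simp [hw]
  · simp only [if_neg hw]
    have hhalf : 1 ≤ PySem.Int.floordiv w 2 := by
      rw [PySem.Int.le_floordiv_iff_mul_le (by omega)]; omega
    rw [List.range_eq_range',
        pv_foldl_set (fun i =>
          let start := max 0 ((i : Int) - PySem.Int.floordiv w 2)
          let stop := min ((labels.length : Nat) : Int) ((i : Int) + PySem.Int.floordiv w 2 + 1)
          let neighborhood := PySem.List.slice labels (some start) (some stop)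
          let on_count := neighborhood.foldl (fun a l => if l == "ON" then a + 1 else a) (0 : Int)
          let off_count := neighborhood.foldl (fun a l => if l == "OFF" then a + 1 else a) (0 : Int)
          if on_count > off_count then "ON" else "OFF")
          labels.length 0 labels (by simp)]
    simp only [List.take_zero, List.nil_append, ← List.range_eq_range']
    apply List.map_congr_left
    intro i hi
    rw [List.mem_range] at hi
    simp only [PySem.List.foldl_count_if, zero_add,
      pv_point labels (PySem.Int.floordiv w 2) hhalf i hi "ON",
      pv_point labels (PySem.Int.floordiv w 2) hhalf i hi "OFF"]
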